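-- pv_equiv track=rewrite | github.com/domwithcode02/econovault-api | backend/sparse_fieldsets.py | _extract_nested_fields
-- ===== SOURCE A (Python) =====
-- from typing import Dict, Any, List, Optional, Set
--
-- def _extract_nested_fields(fields: Set[str]) -> Dict[str, Set[str]]:
--     """Extract nested field structure"""
--     nested = {}
--
--     for field in fields:
--         if "." in field:
--             parent, child = field.split(".", 1)
--             if parent not in nested:
--                 nested[parent] = set()
--             nested[parent].add(child)
--
--     return nested
-- ===== SOURCE B (Python) =====
-- def _extract_nested_fields(fields):
--     """Extract nested field structure (index-then-group re-implementation)."""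
--     pairs = [tuple(f.split(".", 1)) for f in fields if "." in f]
--     parents = list(dict.fromkeys(p for p, _ in pairs))
--     return {p: {c for q, c in pairs if q == p} for p in parents}
-- ===== Notes on version B (the rewrite author's own statement) =====
-- stated objective: alternative
-- what changed: B first builds the full (parent, child) pair index with a filter+split comprehension, then dedups parents and builds each parent's child set with one per-parent comprehension, instead of A's single scan that incrementally mutates a dict of sets.
import Mathlib
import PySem

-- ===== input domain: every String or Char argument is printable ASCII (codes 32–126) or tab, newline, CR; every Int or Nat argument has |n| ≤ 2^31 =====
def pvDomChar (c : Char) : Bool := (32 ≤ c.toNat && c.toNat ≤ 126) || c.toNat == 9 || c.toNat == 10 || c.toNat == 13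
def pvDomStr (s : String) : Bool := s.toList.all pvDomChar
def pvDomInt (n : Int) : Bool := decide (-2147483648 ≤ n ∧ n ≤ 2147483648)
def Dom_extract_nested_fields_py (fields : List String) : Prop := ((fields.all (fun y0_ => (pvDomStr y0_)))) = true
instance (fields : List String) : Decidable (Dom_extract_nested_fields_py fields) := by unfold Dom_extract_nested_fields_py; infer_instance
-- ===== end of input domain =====

-- B builds the (parent, child) pair index first, then groups per parent; A mutates a dict of sets in one scan. Return-value equivalence only.

-- ===== PORT A =====
-- one Python loop iteration: if "." in field, split and add child to nested[parent]
def pvStepA (d : PySem.Dict String (PySem.Set String)) (field : String) :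
    PySem.Dict String (PySem.Set String) :=
  if PySem.Str.isIn "." field then
    let pieces := (PySem.Str.splitMax? field "." 1).getD []
    let parent := pieces.getD 0 ""
    let child := pieces.getD 1 ""
    let d1 := if d.contains parent then d else d.insert parent PySem.Set.empty
    -- nested[parent].add(child): in-place add = overwrite at the same key
    d1.insert parent ((d1.getD parent PySem.Set.empty).add child)
  else d

def extract_nested_fields_py (fields : List String) : List (String × List String) :=
  (fields.foldl pvStepA PySem.Dict.empty).items

-- ===== PORT B =====
-- split a dotted field into (parent, child)
def pvPair (f : String) : String × String :=
  let ps := (PySem.Str.splitMax? f "." 1).getD []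
  (ps.getD 0 "", ps.getD 1 "")

def extract_nested_fields_py_alt (fields : List String) : List (String × List String) :=
  let pairs := (fields.filter (fun f => PySem.Str.isIn "." f)).map pvPair
  let parents := PySem.List.dedup (pairs.map (·.1))
  parents.map (fun p =>
    (p, PySem.Set.ofList ((pairs.filter (fun pc => pc.1 == p)).map (·.2))))

-- ===== PRECONDITION & SPEC =====
def Spec_extract_nested_fields_py (fields : List String) (out : List (String × List String)) : Prop := out = extract_nested_fields_py_alt fields
instance (fields : List String) (out : List (String × List String)) : Decidable (Spec_extract_nested_fields_py fields out) := by unfold Spec_extract_nested_fields_py; infer_instance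

-- ===== CLAIM (what is proved, stated in full; the proofs are below) =====
def Claim_equal_extract_nested_fields_py : Prop := ∀ (fields : List String), Dom_extract_nested_fields_py fields → Spec_extract_nested_fields_py fields (extract_nested_fields_py fields)

-- ===== LEMMAS AND PROOFS =====

-- the simplified grouping step over (parent, child) pairs
def pvStepP (d : PySem.Dict String (PySem.Set String)) (pc : String × String) :
    PySem.Dict String (PySem.Set String) :=
  d.insert pc.1 ((d.getD pc.1 PySem.Set.empty).add pc.2)

lemma pvInsertAdd (d : PySem.Dict String (PySem.Set String)) (parent child : String) :
    (if d.contains parent then d else d.insert parent PySem.Set.empty).insert parent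
      (((if d.contains parent then d
          else d.insert parent PySem.Set.empty).getD parent PySem.Set.empty).add child)
      = d.insert parent ((d.getD parent PySem.Set.empty).add child) := by
  by_cases hc : d.contains parent
  · rw [if_pos hc]
  · have hc' : d.contains parent = false := by simpa using hc
    rw [if_neg hc, PySem.Dict.insert_insert_self, PySem.Dict.getD_insert_self]
    simp [PySem.Dict.getD_of_not_contains, hc']

lemma pvStepA_eq (d : PySem.Dict String (PySem.Set String)) (f : String) :
    pvStepA d f = if PySem.Str.isIn "." f then pvStepP d (pvPair f) else d := by
  by_cases h : PySem.Str.isIn "." f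
  · rw [if_pos h]; unfold pvStepA; rw [if_pos h]; exact pvInsertAdd ..
  · rw [if_neg h]; unfold pvStepA; rw [if_neg h]

lemma pvFoldA_eq : ∀ (l : List String) (d : PySem.Dict String (PySem.Set String)),
    l.foldl pvStepA d
      = l.foldl (fun d f => if PySem.Str.isIn "." f then pvStepP d (pvPair f) else d) d := by
  intro l
  induction l with
  | nil => intro d; rfl
  | cons x xs ih => intro d; rw [List.foldl_cons, List.foldl_cons, pvStepA_eq, ih]

lemma pvFoldFilter {α β γ : Type} (c : α → Bool) (h : α → β) (g : γ → β → γ) :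
    ∀ (l : List α) (d : γ),
      l.foldl (fun d f => if c f then g d (h f) else d) d
        = ((l.filter c).map h).foldl g d := by
  intro l
  induction l with
  | nil => intro d; rfl
  | cons x xs ih =>
    intro d
    by_cases hx : c x <;> simp [List.foldl, hx, ih]

lemma pvGetD_fold (l : List (String × String)) :
    ∀ (d : PySem.Dict String (PySem.Set String)) (p : String),
      (l.foldl pvStepP d).getD p PySem.Set.empty
        = PySem.Set.update (d.getD p PySem.Set.empty)
            ((l.filter (fun pc => pc.1 == p)).map (·.2)) := by
  induction l with
  | nil => intro d p; rfl
  | cons pc rest ih =>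
    intro d p
    rw [List.foldl_cons, ih]
    by_cases hp : pc.1 = p
    · subst hp
      simp [pvStepP, PySem.Set.update, PySem.Dict.getD_insert_self]
    · have hb : (pc.1 == p) = false := by simp [hp]
      have hne : p ≠ pc.1 := Ne.symm hp
      simp [pvStepP, PySem.Dict.getD_insert_of_ne, hne, hb]

lemma pvKeys_fold (l : List (String × String)) :
    (l.foldl pvStepP PySem.Dict.empty).keys = PySem.Set.ofList (l.map (·.1)) := by
  have h := PySem.Dict.keys_foldl_insert_key (l := l) (key := (·.1))
    (f := fun d pc => (d.getD pc.1 PySem.Set.empty).add pc.2) (d := PySem.Dict.empty)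
  simpa [pvStepP, PySem.Set.update, PySem.Set.ofList, PySem.Dict.keys_empty] using h

lemma pvNodup_fold (l : List (String × String)) :
    (l.foldl pvStepP PySem.Dict.empty).keys.Nodup := by
  have h := PySem.Dict.nodup_keys_foldl_insert_key (l := l) (key := (·.1))
    (f := fun d pc => (d.getD pc.1 PySem.Set.empty).add pc.2) (d := PySem.Dict.empty)
    (by simp)
  simpa [pvStepP] using h

-- ===== VERDICT (by name: the statement is the Claim_ definition above) =====
theorem extract_nested_fields_py_spec : Claim_equal_extract_nested_fields_py := by
  intro fields _
  unfold Spec_extract_nested_fields_py extract_nested_fields_py extract_nested_fields_py_alt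
  rw [pvFoldA_eq, pvFoldFilter]
  set pairs := (fields.filter (fun f => PySem.Str.isIn "." f)).map pvPair with hpairs
  rw [PySem.Dict.items_eq_map_keys _ (pvNodup_fold pairs) PySem.Set.empty]
  rw [pvKeys_fold, ← PySem.List.dedup_eq_ofList]
  apply List.map_congr_left
  intro p _
  rw [pvGetD_fold]
  simp [PySem.Dict.getD_empty, PySem.Set.update, PySem.Set.ofList_eq_foldl]
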